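-- pv_equiv track=rewrite | github.com/iseekk/Learning_Python | Codewars/talk_like_siegfried.py | week4
-- ===== SOURCE A (Python) =====
-- def week4(text):
--     indices = []
--
--     for i in range(len(text) - 1):
--         if text[i].lower() == "t" and text[i + 1].lower() == "h":
--             if text[i] == "t":
--                 text[i] = "z"
--                 indices.append(i+1)
--             else:
--                 text[i] = "Z"
--                 indices.append(i+1)
--         elif text[i].lower() == "w" and text[i + 1].lower() == "r":
--             indices.append(i)
--             if text[i] == "W":
--                 text[i + 1] = "R"
--         elif text[i].lower() == "w":
--             if text[i + 1].lower() == "h":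
--                 indices.append(i + 1)
--             if text[i] == "W":
--                 text[i] = "V"
--             else:
--                 text[i] = "v"
--
--     for count, index in enumerate(indices):
--         del text[index - count]
--     return text
-- ===== SOURCE B (Python) =====
-- SPECIAL = {"t", "T", "w", "W"}
--
-- def week4(text):
--     # Single forward pass: apply the replacements while carrying a pending override /
--     # skip flag for the next element, and filter out deleted positions directly,
--     # instead of A's mutate-in-place scan plus a second del-loop.
--     # (s.lower() == "t" holds exactly for s in {"t","T"}, so plain membership tests
--     # replace the per-element .lower() calls.)
--     # Returns a new list; unlike A it does not mutate its argument in place.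
--     n1 = len(text) - 1
--     out = []
--     append = out.append
--     override = None   # value forced onto the current element by the previous step
--     skip = False      # current element was marked deleted by the previous step
--     for i, c in enumerate(text):
--         if override is not None:
--             c = override
--             override = None
--         drop = skip
--         skip = False
--         if c in SPECIAL and i < n1:
--             nxt = text[i + 1]
--             if c == "t" or c == "T":
--                 if nxt == "h" or nxt == "H":
--                     c = "z" if c == "t" else "Z"
--                     skip = True
--             else:  # c is "w" or "W"
--                 if nxt == "r" or nxt == "R":
--                     drop = True
--                     if c == "W":
--                         override = "R"
--                 else:
--                     if nxt == "h" or nxt == "H":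
--                         skip = True
--                     c = "V" if c == "W" else "v"
--         if not drop:
--             append(c)
--     return out
-- ===== Notes on version B (the rewrite author's own statement) =====
-- stated objective: alternative
-- what changed: A mutates the list in place while collecting deletion indices and then runs a second del-loop (each del shifting the tail, quadratic in the number of deletions); B does one forward pass that applies the replacements via a pending override/skip state and simply filters out deleted positions, building a new output list directly (membership tests replace the per-element .lower() calls; B does not mutate its argument).
import Mathlib
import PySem

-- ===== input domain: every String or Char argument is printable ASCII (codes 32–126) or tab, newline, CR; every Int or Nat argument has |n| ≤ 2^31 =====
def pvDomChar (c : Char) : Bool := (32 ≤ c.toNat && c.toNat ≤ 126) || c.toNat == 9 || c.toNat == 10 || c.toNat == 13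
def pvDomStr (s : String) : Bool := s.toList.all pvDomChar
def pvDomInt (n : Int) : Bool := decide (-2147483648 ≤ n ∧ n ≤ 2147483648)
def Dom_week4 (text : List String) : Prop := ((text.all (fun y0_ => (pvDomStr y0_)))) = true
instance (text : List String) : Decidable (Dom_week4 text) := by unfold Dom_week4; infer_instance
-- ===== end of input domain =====

-- B replaces A's mutate-in-place scan + second del-loop by a single forward pass that
-- carries a pending override/skip flag and filters deleted positions directly (return-value
-- equivalence only: A mutates its argument in place, B builds a new list).


-- ===== PORT A =====
-- one iteration of A's loop body; state = (text, indices)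
def week4Step (st : List String × List Int) (i : Int) : List String × List Int :=
  let cur := PySem.List.pyGetD st.1 i ""          -- text[i]; 0 ≤ i < len(text)-1, in range
  let nxt := PySem.List.pyGetD st.1 (i + 1) ""    -- text[i+1]; in range
  if PySem.Str.lower cur = "t" ∧ PySem.Str.lower nxt = "h" then
    if cur = "t" then (PySem.List.pySetD st.1 i "z", st.2 ++ [i + 1])
    else (PySem.List.pySetD st.1 i "Z", st.2 ++ [i + 1])
  else if PySem.Str.lower cur = "w" ∧ PySem.Str.lower nxt = "r" then
    ((if cur = "W" then PySem.List.pySetD st.1 (i + 1) "R" else st.1), st.2 ++ [i])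
  else if PySem.Str.lower cur = "w" then
    ((if cur = "W" then PySem.List.pySetD st.1 i "V" else PySem.List.pySetD st.1 i "v"),
     if PySem.Str.lower nxt = "h" then st.2 ++ [i + 1] else st.2)
  else (st.1, st.2)

-- 'del text[index - count]'; the collected indices are strictly increasing and in
-- range, so pop? never returns none (the none branch is unreachable, not a default)
def week4Del (t : List String) (p : Int × Int) : List String :=
  match PySem.List.pop? t (p.2 - p.1) with
  | some r => r.2
  | none => t

def week4 (text : List String) : List String :=
  let n : Int := text.length
  let st := (PySem.List.pyRange 0 (n - 1) 1).foldl week4Step (text, ([] : List Int))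
  (PySem.List.enumerate st.2 0).foldl week4Del st.1

-- ===== PORT B =====
-- Source B's loop body for a non-last element: from (current char, next char) compute
-- (emitted char, drop-current?, skip-next?, override for next char)
def week4AltStep (c nxt : String) : String × Bool × Bool × Option String :=
  if c = "t" ∨ c = "T" ∨ c = "w" ∨ c = "W" then     -- c in SPECIAL
    if c = "t" ∨ c = "T" then
      if nxt = "h" ∨ nxt = "H" then ((if c = "t" then "z" else "Z"), false, true, none)
      else (c, false, false, none)
    else
      if nxt = "r" ∨ nxt = "R" then (c, true, false, if c = "W" then some "R" else none)
      else ((if c = "W" then "V" else "v"), false, decide (nxt = "h" ∨ nxt = "H"), none)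
  else (c, false, false, none)

-- Source B's forward while-loop as the obvious recursion on the remaining list,
-- carrying Source B's (override, skip) state
def week4AltGo (ov : Option String) (skip : Bool) : List String → List String
  | [] => []
  | [c0] => if skip then [] else [ov.getD c0]
  | c0 :: nxt :: rest =>
    let r := week4AltStep (ov.getD c0) nxt
    (if skip || r.2.1 then [] else [r.1]) ++ week4AltGo r.2.2.2 r.2.2.1 (nxt :: rest)

def week4_alt (text : List String) : List String := week4AltGo none false text

-- ===== PRECONDITION & SPEC =====
def Spec_week4 (text : List String) (out : List String) : Prop := out = week4_alt text
instance (text : List String) (out : List String) : Decidable (Spec_week4 text out) := by unfold Spec_week4; infer_instance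

-- ===== CLAIM (what is proved, stated in full; the proofs are below) =====
def Claim_equal_week4 : Prop := ∀ (text : List String), Dom_week4 text → Spec_week4 text (week4 text)

-- ===== LEMMAS AND PROOFS =====

-- remove from t the elements whose label is in I, labelling t's head with b
def remIdxs (I : List Int) (b : Int) : List String → List String
  | [] => []
  | x :: xs => (if b ∈ I then [] else [x]) ++ remIdxs I (b + 1) xs

theorem remIdxs_nil (b : Int) (t : List String) : remIdxs [] b t = t := by
  induction t generalizing b with
  | nil => rfl
  | cons x xs ih => simp [remIdxs, ih]

theorem remIdxs_append (I : List Int) (b : Int) (ys zs : List String) :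
    remIdxs I b (ys ++ zs) = remIdxs I b ys ++ remIdxs I (b + (ys.length : Int)) zs := by
  induction ys generalizing b with
  | nil => simp [remIdxs]
  | cons x xs ih =>
    simp only [List.cons_append, remIdxs, ih, List.length_cons, List.append_assoc]
    congr 3
    push_cast; ring

theorem remIdxs_snoc_ge (I : List Int) (j b : Int) (t : List String)
    (h : b + (t.length : Int) ≤ j) : remIdxs (I ++ [j]) b t = remIdxs I b t := by
  induction t generalizing b with
  | nil => rfl
  | cons x xs ih =>
    simp only [remIdxs]
    have hb : b ≠ j := by simp at h ⊢; omega
    have : (b ∈ I ++ [j]) ↔ b ∈ I := by simp [hb]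
    rw [ih]
    · simp [this]
    · simp at h ⊢; omega

theorem remIdxs_drop_lt (i b : Int) (I : List Int) (t : List String) (h : i < b) :
    remIdxs (i :: I) b t = remIdxs I b t := by
  induction t generalizing b with
  | nil => rfl
  | cons x xs ih =>
    simp only [remIdxs]
    have hb : b ≠ i := by omega
    rw [ih (b + 1) (by omega)]
    simp [hb]

theorem remIdxs_erase (i : Int) (I : List Int) : ∀ (t : List String) (b : Int),
    b ≤ i → (i - b).toNat < t.length → (∀ j ∈ I, i < j) →
    remIdxs (i :: I) b t = remIdxs I (b + 1) (t.eraseIdx (i - b).toNat)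
  | [], b => by intro _ h; simp at h
  | x :: xs, b => by
    intro hbi hlen hI
    by_cases hb : b = i
    · have h0 : (i - b).toNat = 0 := by omega
      have hmem : b ∈ (i :: I) := by simp [hb]
      rw [h0]
      simp only [List.eraseIdx_cons_zero, remIdxs, if_pos hmem, List.nil_append]
      rw [remIdxs_drop_lt i (b + 1) I xs (by omega)]
    · have hm : 0 < (i - b).toNat := by omega
      have hbn : b ∉ (i :: I) := by
        simp only [List.mem_cons]
        push Not
        exact ⟨hb, fun hmem => by have := hI b hmem; omega⟩
      have hbn1 : (b + 1) ∉ I := fun hmem => by have := hI _ hmem; omega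
      have he : (x :: xs).eraseIdx (i - b).toNat = x :: xs.eraseIdx ((i - b).toNat - 1) := by
        cases hc : (i - b).toNat with
        | zero => omega
        | succ m => simp [List.eraseIdx_cons_succ]
      rw [he]
      simp only [remIdxs, if_neg hbn, if_neg hbn1, List.cons_append,
        List.nil_append]
      have harg : (i - b).toNat - 1 = (i - (b + 1)).toNat := by omega
      rw [harg, remIdxs_erase i I xs (b + 1) (by omega) (by simp at hlen ⊢; omega) hI]

theorem delFold_eq_remIdxs : ∀ (I : List Int) (c : Int) (t : List String),
    I.Pairwise (· < ·) → (∀ j ∈ I, c ≤ j ∧ j - c < (t.length : Int)) →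
    (PySem.List.enumerate I c).foldl week4Del t = remIdxs I c t
  | [], c, t => by intro _ _; simp [PySem.List.enumerate_nil, remIdxs_nil]
  | i :: I, c, t => by
    intro hp hr
    obtain ⟨hci, hilen⟩ := hr i (by simp)
    have hnn : 0 ≤ i - c := by omega
    have hnat : i - c = ((i - c).toNat : Int) := by omega
    have hlt : (i - c).toNat < t.length := by omega
    have hdel : week4Del t (c, i) = t.eraseIdx (i - c).toNat := by
      have hpop := PySem.List.pop?_natCast t (i - c).toNat hlt
      rw [← hnat] at hpop
      simp only [week4Del, hpop]
    rw [PySem.List.enumerate_cons, List.foldl_cons, hdel]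
    have hItail : ∀ j ∈ I, i < j := by
      intro j hj
      exact (List.pairwise_cons.mp hp).1 j hj
    rw [delFold_eq_remIdxs I (c + 1) (t.eraseIdx (i - c).toNat) (List.pairwise_cons.mp hp).2
      (by
        intro j hj
        obtain ⟨h1, h2⟩ := hr j (by simp [hj])
        have := hItail j hj
        constructor
        · omega
        · rw [List.length_eraseIdx_of_lt hlt]; omega)]
    rw [remIdxs_erase i I t c hci hlt hItail]


theorem char_toNat_eq (c d : Char) (h : c.toNat = d.toNat) : c = d :=
  Char.ext (UInt32.toNat_inj.mp h)

theorem char_le_iff (c d : Char) : c ≤ d ↔ c.toNat ≤ d.toNat := by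
  rw [Char.le_def, UInt32.le_iff_toNat_le]; rfl

-- lowerChar c = lo ↔ c ∈ {lo, its uppercase}, for a lowercase ASCII letter lo
theorem lowerChar_eq_iff (c lo up : Char)
    (hlo : 97 ≤ lo.toNat ∧ lo.toNat ≤ 122) (hup : up.toNat + 32 = lo.toNat) :
    PySem.Chars.lowerChar c = lo ↔ c = lo ∨ c = up := by
  unfold PySem.Chars.lowerChar PySem.Chars.isupper
  have hA : ('A' ≤ c) ↔ 65 ≤ c.toNat := by
    rw [char_le_iff]; constructor <;> intro h <;> simpa using h
  have hZ : (c ≤ 'Z') ↔ c.toNat ≤ 90 := by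
    rw [char_le_iff]; constructor <;> intro h <;> simpa using h
  by_cases h : 65 ≤ c.toNat ∧ c.toNat ≤ 90
  · rw [if_pos (by simp [hA, hZ, h.1, h.2])]
    have hval : Nat.isValidChar (c.toNat + 32) := Or.inl (by omega)
    constructor
    · intro he
      right
      apply char_toNat_eq
      have h2 := congrArg Char.toNat he
      rw [Char.toNat_ofNat, if_pos hval] at h2
      omega
    · rintro (rfl | hc)
      · omega
      · rw [hc]
        apply char_toNat_eq
        rw [Char.toNat_ofNat, if_pos (Or.inl (by omega) : Nat.isValidChar (up.toNat + 32))]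
        omega
  · rw [if_neg (by simp [hA, hZ]; omega)]
    constructor
    · intro he; exact Or.inl he
    · rintro (rfl | hc)
      · rfl
      · rw [hc] at h ⊢
        omega

theorem lower_eq_single_iff (s : String) (lo up : Char)
    (hlo : 97 ≤ lo.toNat ∧ lo.toNat ≤ 122) (hup : up.toNat + 32 = lo.toNat)
    (slo sup : String) (hslo : slo.toList = [lo]) (hsup : sup.toList = [up]) :
    (PySem.Str.lower s = slo ↔ s = slo ∨ s = sup) := by
  rw [← String.toList_inj (s₁ := PySem.Str.lower s) (s₂ := slo),
    ← String.toList_inj (s₁ := s) (s₂ := slo), ← String.toList_inj (s₁ := s) (s₂ := sup),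
    PySem.Str.toList_lower, hslo, hsup]
  cases hl : s.toList with
  | nil => simp [PySem.Chars.lower]
  | cons c cs =>
    cases cs with
    | nil => simp [PySem.Chars.lower, lowerChar_eq_iff c lo up hlo hup]
    | cons d ds => simp [PySem.Chars.lower]

theorem lower_eq_t (s : String) : PySem.Str.lower s = "t" ↔ s = "t" ∨ s = "T" :=
  lower_eq_single_iff s 't' 'T' (by decide) (by decide) "t" "T" (by decide) (by decide)
theorem lower_eq_h (s : String) : PySem.Str.lower s = "h" ↔ s = "h" ∨ s = "H" :=
  lower_eq_single_iff s 'h' 'H' (by decide) (by decide) "h" "H" (by decide) (by decide)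
theorem lower_eq_w (s : String) : PySem.Str.lower s = "w" ↔ s = "w" ∨ s = "W" :=
  lower_eq_single_iff s 'w' 'W' (by decide) (by decide) "w" "W" (by decide) (by decide)
theorem lower_eq_r (s : String) : PySem.Str.lower s = "r" ↔ s = "r" ∨ s = "R" :=
  lower_eq_single_iff s 'r' 'R' (by decide) (by decide) "r" "R" (by decide) (by decide)

theorem week4AltGo_ov (ov : Option String) (s : Bool) (c : String) (rest : List String) :
    week4AltGo ov s (c :: rest) = week4AltGo none s (ov.getD c :: rest) := by
  cases rest <;> simp [week4AltGo]

theorem week4_base (k : Int) (t : List String) (I : List Int)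
    (h0 : 0 ≤ k) (hk : (t.length : Int) - 1 ≤ k) :
    remIdxs I 0 t = remIdxs I 0 (t.take k.toNat) ++ week4AltGo none (decide (k ∈ I)) (t.drop k.toNat) := by
  by_cases hge : (t.length : Int) ≤ k
  · have hdrop : t.drop k.toNat = [] := List.drop_eq_nil_of_le (by omega)
    have htake : t.take k.toNat = t := List.take_of_length_le (by omega)
    rw [hdrop, htake]
    cases h : decide (k ∈ I) <;> simp [week4AltGo]
  · -- k = len - 1, len ≥ 1
    have hlen : k.toNat < t.length := by omega
    have hsplit : t.drop k.toNat = [t[k.toNat]] := by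
      rw [List.drop_eq_getElem_cons hlen]
      simp [List.drop_eq_nil_of_le (by omega : t.length ≤ k.toNat + 1)]
    conv_lhs => rw [← List.take_append_drop k.toNat t, hsplit]
    rw [remIdxs_append]
    have hl : (0 : Int) + ((t.take k.toNat).length : Int) = k := by
      simp [List.length_take]; omega
    rw [hl]
    congr 1
    by_cases hm : k ∈ I <;> simp [remIdxs, week4AltGo, hm, hsplit]

-- step analysis: one loop iteration preserves the invariant equation
theorem week4_step_eq (k : Int) (t : List String) (I : List Int)
    (h0 : 0 ≤ k) (hk : k < (t.length : Int) - 1)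
    (hr : ∀ j ∈ I, 0 ≤ j ∧ j ≤ k ∧ j < (t.length : Int))
    (h3 : (k ∈ I) → PySem.Str.lower (PySem.List.pyGetD t k "") = "h") :
    remIdxs (week4Step (t, I) k).2 0 ((week4Step (t, I) k).1.take (k+1).toNat) ++
      week4AltGo none (decide ((k+1) ∈ (week4Step (t, I) k).2)) ((week4Step (t, I) k).1.drop (k+1).toNat)
    = remIdxs I 0 (t.take k.toNat) ++ week4AltGo none (decide (k ∈ I)) (t.drop k.toNat) := by
  have hklt : k.toNat < t.length := by omega
  have hk1lt : k.toNat + 1 < t.length := by omega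
  have hk1 : (k+1).toNat = k.toNat + 1 := by omega
  have hcur : PySem.List.pyGetD t k "" = t[k.toNat] :=
    PySem.List.pyGetD_eq_getElem t "" h0 (by omega)
  have hnxt : PySem.List.pyGetD t (k+1) "" = t[k.toNat + 1] := by
    rw [PySem.List.pyGetD_eq_getElem t "" (by omega) (by omega)]
    simp only [show (k + 1).toNat = k.toNat + 1 from by omega]
  set cur := t[k.toNat] with hcurdef
  set nxt := t[k.toNat + 1] with hnxtdef
  have hdropk : t.drop k.toNat = cur :: nxt :: t.drop (k.toNat + 2) := by
    rw [List.drop_eq_getElem_cons hklt, List.drop_eq_getElem_cons hk1lt]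
  have hk1notI : (k + 1) ∉ I := fun hmem => by have := hr _ hmem; omega
  have hdropk1 : t.drop (k.toNat + 1) = nxt :: t.drop (k.toNat + 2) :=
    List.drop_eq_getElem_cons hk1lt
  have hlentake : ((t.take k.toNat).length : Int) = k := by simp [List.length_take]; omega
  by_cases c1 : PySem.Str.lower cur = "t" ∧ PySem.Str.lower nxt = "h"
  · -- th branch
    have hkI : k ∉ I := by
      intro hm
      have h := h3 hm
      rw [hcur] at h
      exact absurd (c1.1.symm.trans h) (by decide)
    set v : String := if cur = "t" then "z" else "Z" with hv
    have hstep : week4Step (t, I) k = (t.set k.toNat v, I ++ [k + 1]) := by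
      rw [hv]
      by_cases hct : cur = "t"
      · simp only [week4Step, hcur, hnxt, if_pos c1, if_pos hct,
          PySem.List.pySetD_of_nonneg _ _ h0]
      · simp only [week4Step, hcur, hnxt, if_pos c1, if_neg hct,
          PySem.List.pySetD_of_nonneg _ _ h0]
    rw [hstep]
    have htake : (t.set k.toNat v).take (k + 1).toNat = t.take k.toNat ++ [v] := by
      rw [hk1, List.take_add_one]
      congr 1
      · exact List.take_set_of_le (le_refl _)
      · simp [hklt]
    have hdropset : (t.set k.toNat v).drop (k + 1).toNat = t.drop (k.toNat + 1) := by
      rw [hk1]; simp [List.drop_set]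
    rw [htake, hdropset, remIdxs_append,
      remIdxs_snoc_ge I (k + 1) 0 (t.take k.toNat) (by simp [List.length_take]; omega)]
    have hsingle : remIdxs (I ++ [k + 1]) (0 + ((t.take k.toNat).length : Int)) [v] = [v] := by
      rw [zero_add, hlentake]
      have hnm : k ∉ I ++ [k + 1] := by
        simp only [List.mem_append, List.mem_singleton]
        push Not
        exact ⟨hkI, by omega⟩
      simp [remIdxs, hnm]
    rw [hsingle, hdropk, hdropk1]
    have haltstep : week4AltStep cur nxt = (v, false, true, none) := by
      have ct := (lower_eq_t cur).mp c1.1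
      have nh := (lower_eq_h nxt).mp c1.2
      have houter : cur = "t" ∨ cur = "T" ∨ cur = "w" ∨ cur = "W" :=
        ct.elim Or.inl (fun h => Or.inr (Or.inl h))
      simp only [week4AltStep, if_pos houter, if_pos ct, if_pos nh, ← hv]
    simp [week4AltGo, haltstep, hkI, List.append_assoc]
  by_cases c2 : PySem.Str.lower cur = "w" ∧ PySem.Str.lower nxt = "r"
  · -- wr branch
    have hkI : k ∉ I := by
      intro hm
      have h := h3 hm
      rw [hcur] at h
      exact absurd (c2.1.symm.trans h) (by decide)
    set ov : Option String := if cur = "W" then some "R" else none with hov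
    have hstep : week4Step (t, I) k =
        ((if cur = "W" then t.set (k.toNat + 1) "R" else t), I ++ [k]) := by
      by_cases hcw : cur = "W"
      · simp only [week4Step, hcur, hnxt, if_neg c1, if_pos c2, if_pos hcw]
        rw [show k + 1 = ((k.toNat + 1 : Nat) : Int) from by omega, PySem.List.pySetD_natCast]
      · simp only [week4Step, hcur, hnxt, if_neg c1, if_pos c2, if_neg hcw]
    rw [hstep]
    have hbase : t.take (k.toNat + 1) = t.take k.toNat ++ [cur] := by
      rw [List.take_add_one]
      simp [List.getElem?_eq_getElem hklt, hcurdef]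
    have htake : (if cur = "W" then t.set (k.toNat + 1) "R" else t).take (k + 1).toNat
        = t.take k.toNat ++ [cur] := by
      by_cases hcw : cur = "W" <;>
        simp [hcw, hk1, List.take_set_of_le (le_refl (k.toNat + 1)), hbase]
    have hdrop1 : (if cur = "W" then t.set (k.toNat + 1) "R" else t).drop (k + 1).toNat
        = ov.getD nxt :: t.drop (k.toNat + 2) := by
      by_cases hcw : cur = "W"
      · rw [if_pos hcw, hk1]
        rw [List.drop_eq_getElem_cons (by simp; omega : k.toNat + 1 < (t.set (k.toNat + 1) "R").length)]
        simp [List.drop_set, hov, hcw]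
      · simp [hcw, hov, hk1, hdropk1]
    rw [htake, hdrop1, remIdxs_append,
      remIdxs_snoc_ge I k 0 (t.take k.toNat) (by simp [List.length_take]; omega)]
    have hsingle : remIdxs (I ++ [k]) (0 + ((t.take k.toNat).length : Int)) [cur] = [] := by
      rw [zero_add, hlentake]
      have hm : k ∈ I ++ [k] := by simp
      simp [remIdxs, hm]
    rw [hsingle, hdropk]
    have hmem : decide ((k + 1) ∈ I ++ [k]) = false := by
      simp only [decide_eq_false_iff_not, List.mem_append, List.mem_singleton]
      push Not
      exact ⟨hk1notI, by omega⟩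
    rw [hmem]
    have haltstep : week4AltStep cur nxt = (cur, true, false, ov) := by
      have cw := (lower_eq_w cur).mp c2.1
      have nr := (lower_eq_r nxt).mp c2.2
      have houter : cur = "t" ∨ cur = "T" ∨ cur = "w" ∨ cur = "W" :=
        cw.elim (fun h => Or.inr (Or.inr (Or.inl h))) (fun h => Or.inr (Or.inr (Or.inr h)))
      have hnott : ¬(cur = "t" ∨ cur = "T") := fun h =>
        absurd (c2.1.symm.trans ((lower_eq_t cur).mpr h)) (by decide)
      simp only [week4AltStep, if_pos houter, if_neg hnott, if_pos nr, ← hov]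
    have hgo := week4AltGo_ov ov false nxt (t.drop (k.toNat + 2))
    simp only [week4AltGo, haltstep, Option.getD_none, Bool.or_true, if_pos, ← hgo]
    simp
  by_cases c3 : PySem.Str.lower cur = "w"
  · -- w (not followed by r) branch
    have hkI : k ∉ I := by
      intro hm
      have h := h3 hm
      rw [hcur] at h
      exact absurd (c3.symm.trans h) (by decide)
    set v : String := if cur = "W" then "V" else "v" with hv
    set I1 : List Int := if PySem.Str.lower nxt = "h" then I ++ [k + 1] else I with hI1
    have hstep : week4Step (t, I) k = (t.set k.toNat v, I1) := by
      simp only [week4Step, hcur, hnxt, if_neg c1, if_neg c2, if_pos c3,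
        PySem.List.pySetD_of_nonneg _ _ h0]
      rw [hv, hI1]
      by_cases hcw : cur = "W" <;> simp [hcw]
    rw [hstep]
    have htake : (t.set k.toNat v).take (k + 1).toNat = t.take k.toNat ++ [v] := by
      rw [hk1, List.take_add_one]
      congr 1
      · exact List.take_set_of_le (le_refl _)
      · simp [hklt]
    have hdropset : (t.set k.toNat v).drop (k + 1).toNat = t.drop (k.toNat + 1) := by
      rw [hk1]; simp [List.drop_set]
    rw [htake, hdropset]
    have hmemk1 : decide ((k + 1) ∈ I1) = decide (nxt = "h" ∨ nxt = "H") := by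
      by_cases hnh : PySem.Str.lower nxt = "h" <;>
        simp [hI1, hnh, hk1notI, ← lower_eq_h]
    have hrem : remIdxs I1 0 (t.take k.toNat ++ [v]) = remIdxs I 0 (t.take k.toNat) ++ [v] := by
      by_cases hnh : PySem.Str.lower nxt = "h"
      · rw [hI1, if_pos hnh, remIdxs_append,
          remIdxs_snoc_ge I (k + 1) 0 (t.take k.toNat) (by simp [List.length_take]; omega)]
        congr 1
        rw [zero_add, hlentake]
        have hnm : k ∉ I ++ [k + 1] := by
          simp only [List.mem_append, List.mem_singleton]
          push Not
          exact ⟨hkI, by omega⟩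
        simp [remIdxs, hnm]
      · rw [hI1, if_neg hnh, remIdxs_append]
        congr 1
        rw [zero_add, hlentake]
        simp [remIdxs, hkI]
    rw [hrem, hmemk1, hdropk, hdropk1]
    have haltstep : week4AltStep cur nxt
        = (v, false, decide (nxt = "h" ∨ nxt = "H"), none) := by
      have cw := (lower_eq_w cur).mp c3
      have houter : cur = "t" ∨ cur = "T" ∨ cur = "w" ∨ cur = "W" :=
        cw.elim (fun h => Or.inr (Or.inr (Or.inl h))) (fun h => Or.inr (Or.inr (Or.inr h)))
      have hnott : ¬(cur = "t" ∨ cur = "T") := fun h =>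
        absurd (c3.symm.trans ((lower_eq_t cur).mpr h)) (by decide)
      have hnr : ¬(nxt = "r" ∨ nxt = "R") := fun h => c2 ⟨c3, (lower_eq_r nxt).mpr h⟩
      simp only [week4AltStep, if_pos houter, if_neg hnott, if_neg hnr, ← hv]
    simp [week4AltGo, haltstep, hkI, List.append_assoc]
  · -- no branch fires
    have hstep : week4Step (t, I) k = (t, I) := by
      simp only [week4Step, hcur, hnxt, if_neg c1, if_neg c2, if_neg c3]
    rw [hstep]
    show remIdxs I 0 (t.take (k + 1).toNat) ++
        week4AltGo none (decide ((k + 1) ∈ I)) (t.drop (k + 1).toNat)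
      = remIdxs I 0 (t.take k.toNat) ++ week4AltGo none (decide (k ∈ I)) (t.drop k.toNat)
    have htake : t.take (k + 1).toNat = t.take k.toNat ++ [cur] := by
      rw [hk1, List.take_add_one]
      simp [List.getElem?_eq_getElem hklt, hcurdef]
    have hdropfix : t.drop (k + 1).toNat = nxt :: t.drop (k.toNat + 2) := by
      rw [hk1, hdropk1]
    rw [htake, remIdxs_append, hdropk, hdropfix]
    have hmem : decide ((k + 1) ∈ I) = false := by simp [hk1notI]
    rw [hmem]
    have haltstep : week4AltStep cur nxt = (cur, false, false, none) := by
      by_cases hct : cur = "t" ∨ cur = "T"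
      · have houter : cur = "t" ∨ cur = "T" ∨ cur = "w" ∨ cur = "W" :=
          hct.elim Or.inl (fun h => Or.inr (Or.inl h))
        have hnh : ¬(nxt = "h" ∨ nxt = "H") := fun h =>
          c1 ⟨(lower_eq_t cur).mpr hct, (lower_eq_h nxt).mpr h⟩
        simp only [week4AltStep, if_pos houter, if_pos hct, if_neg hnh]
      · have hcw : ¬(cur = "w" ∨ cur = "W") := fun h => c3 ((lower_eq_w cur).mpr h)
        have houter : ¬(cur = "t" ∨ cur = "T" ∨ cur = "w" ∨ cur = "W") := fun h =>
          h.elim (fun h1 => hct (Or.inl h1)) (fun h1 =>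
            h1.elim (fun h2 => hct (Or.inr h2)) (fun h2 =>
              h2.elim (fun h3 => hcw (Or.inl h3)) (fun h3 => hcw (Or.inr h3))))
        simp only [week4AltStep, if_neg houter]
    have hsingle : remIdxs I (0 + ((t.take k.toNat).length : Int)) [cur]
        = if k ∈ I then [] else [cur] := by
      rw [zero_add, hlentake]
      by_cases hm : k ∈ I <;> simp [remIdxs, hm]
    rw [hsingle]
    by_cases hm : k ∈ I <;> simp [week4AltGo, haltstep, hm, List.append_assoc]

theorem week4Step_inv (k : Int) (t : List String) (I : List Int)
    (h0 : 0 ≤ k) (hk : k < (t.length : Int) - 1)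
    (hp : I.Pairwise (· < ·))
    (hr : ∀ j ∈ I, 0 ≤ j ∧ j ≤ k ∧ j < (t.length : Int))
    (h3 : (k ∈ I) → PySem.Str.lower (PySem.List.pyGetD t k "") = "h") :
    (week4Step (t, I) k).1.length = t.length ∧
    (week4Step (t, I) k).2.Pairwise (· < ·) ∧
    (∀ j ∈ (week4Step (t, I) k).2, 0 ≤ j ∧ j ≤ k + 1 ∧ j < (t.length : Int)) ∧
    (((k + 1) ∈ (week4Step (t, I) k).2) →
      PySem.Str.lower (PySem.List.pyGetD (week4Step (t, I) k).1 (k + 1) "") = "h") := by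
  have hklt : k.toNat < t.length := by omega
  have hk1lt : k.toNat + 1 < t.length := by omega
  have hcur : PySem.List.pyGetD t k "" = t[k.toNat] :=
    PySem.List.pyGetD_eq_getElem t "" h0 (by omega)
  have hnxt : PySem.List.pyGetD t (k + 1) "" = t[k.toNat + 1] := by
    rw [PySem.List.pyGetD_eq_getElem t "" (by omega) (by omega)]
    simp only [show (k + 1).toNat = k.toNat + 1 from by omega]
  set cur := t[k.toNat] with hcurdef
  set nxt := t[k.toNat + 1] with hnxtdef
  have hk1notI : (k + 1) ∉ I := fun hmem => by have := hr _ hmem; omega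
  have hsetnxt : ∀ v : String, PySem.List.pyGetD (t.set k.toNat v) (k + 1) "" = nxt := by
    intro v
    rw [PySem.List.pyGetD_eq_getElem (t.set k.toNat v) "" (by omega) (by simp; omega)]
    simp only [show (k + 1).toNat = k.toNat + 1 from by omega]
    rw [hnxtdef]
    exact List.getElem_set_ne (by omega) _
  have hpair1 : (I ++ [k + 1]).Pairwise (· < ·) := by
    rw [List.pairwise_append]
    exact ⟨hp, List.pairwise_singleton _ _, fun a ha b hb => by
      simp at hb; have := hr a ha; omega⟩
  have hr1 : ∀ j ∈ I ++ [k + 1], 0 ≤ j ∧ j ≤ k + 1 ∧ j < (t.length : Int) := by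
    intro j hj
    rcases List.mem_append.mp hj with h | h
    · have := hr j h; omega
    · simp at h; omega
  by_cases c1 : PySem.Str.lower cur = "t" ∧ PySem.Str.lower nxt = "h"
  · have goal1 : ∀ v : String,
        (t.set k.toNat v).length = t.length ∧
        (I ++ [k + 1]).Pairwise (· < ·) ∧
        (∀ j ∈ I ++ [k + 1], 0 ≤ j ∧ j ≤ k + 1 ∧ j < (t.length : Int)) ∧
        (((k + 1) ∈ I ++ [k + 1]) →
          PySem.Str.lower (PySem.List.pyGetD (t.set k.toNat v) (k + 1) "") = "h") :=
      fun v => ⟨by simp, hpair1, hr1, fun _ => by rw [hsetnxt]; exact c1.2⟩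
    by_cases hct : cur = "t"
    · simp only [week4Step, hcur, hnxt, if_pos c1, if_pos hct,
        PySem.List.pySetD_of_nonneg _ _ h0]
      exact goal1 "z"
    · simp only [week4Step, hcur, hnxt, if_pos c1, if_neg hct,
        PySem.List.pySetD_of_nonneg _ _ h0]
      exact goal1 "Z"
  by_cases c2 : PySem.Str.lower cur = "w" ∧ PySem.Str.lower nxt = "r"
  · have hkI : k ∉ I := by
      intro hm
      have h := h3 hm
      rw [hcur] at h
      exact absurd (c2.1.symm.trans h) (by decide)
    have hpair2 : (I ++ [k]).Pairwise (· < ·) := by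
      rw [List.pairwise_append]
      exact ⟨hp, List.pairwise_singleton _ _, fun a ha b hb => by
        simp at hb; have h1 := hr a ha; have h2 : a ≠ k := fun h => hkI (h ▸ ha); omega⟩
    have hnm2 : (k + 1) ∉ I ++ [k] := by
      simp only [List.mem_append, List.mem_singleton]
      push Not
      exact ⟨hk1notI, by omega⟩
    have hr2 : ∀ j ∈ I ++ [k], 0 ≤ j ∧ j ≤ k + 1 ∧ j < (t.length : Int) := by
      intro j hj
      rcases List.mem_append.mp hj with h | h
      · have := hr j h; omega
      · simp at h; omega
    by_cases hcw : cur = "W"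
    · simp only [week4Step, hcur, hnxt, if_neg c1, if_pos c2, if_pos hcw]
      exact ⟨by simp [PySem.List.pySetD_of_nonneg _ _ (by omega : (0:Int) ≤ k + 1)],
        hpair2, hr2, fun hmem => absurd hmem hnm2⟩
    · simp only [week4Step, hcur, hnxt, if_neg c1, if_pos c2, if_neg hcw]
      exact ⟨trivial, hpair2, hr2, fun hmem => absurd hmem hnm2⟩
  by_cases c3 : PySem.Str.lower cur = "w"
  · have goal3h : ∀ v : String, PySem.Str.lower nxt = "h" →
        (t.set k.toNat v).length = t.length ∧
        (I ++ [k + 1]).Pairwise (· < ·) ∧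
        (∀ j ∈ I ++ [k + 1], 0 ≤ j ∧ j ≤ k + 1 ∧ j < (t.length : Int)) ∧
        (((k + 1) ∈ I ++ [k + 1]) →
          PySem.Str.lower (PySem.List.pyGetD (t.set k.toNat v) (k + 1) "") = "h") :=
      fun v hnh => ⟨by simp, hpair1, hr1, fun _ => by rw [hsetnxt]; exact hnh⟩
    have goal3n : ∀ v : String,
        (t.set k.toNat v).length = t.length ∧
        I.Pairwise (· < ·) ∧
        (∀ j ∈ I, 0 ≤ j ∧ j ≤ k + 1 ∧ j < (t.length : Int)) ∧
        (((k + 1) ∈ I) →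
          PySem.Str.lower (PySem.List.pyGetD (t.set k.toNat v) (k + 1) "") = "h") :=
      fun v => ⟨by simp, hp, fun j hj => by have := hr j hj; omega,
        fun hmem => absurd hmem hk1notI⟩
    by_cases hnh : PySem.Str.lower nxt = "h"
    · by_cases hcw : cur = "W"
      · simp only [week4Step, hcur, hnxt, if_neg c1, if_neg c2, if_pos c3, if_pos hnh,
          if_pos hcw, PySem.List.pySetD_of_nonneg _ _ h0]
        exact goal3h "V" hnh
      · simp only [week4Step, hcur, hnxt, if_neg c1, if_neg c2, if_pos c3, if_pos hnh,
          if_neg hcw, PySem.List.pySetD_of_nonneg _ _ h0]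
        exact goal3h "v" hnh
    · by_cases hcw : cur = "W"
      · simp only [week4Step, hcur, hnxt, if_neg c1, if_neg c2, if_pos c3, if_neg hnh,
          if_pos hcw, PySem.List.pySetD_of_nonneg _ _ h0]
        exact goal3n "V"
      · simp only [week4Step, hcur, hnxt, if_neg c1, if_neg c2, if_pos c3, if_neg hnh,
          if_neg hcw, PySem.List.pySetD_of_nonneg _ _ h0]
        exact goal3n "v"
  · simp only [week4Step, hcur, hnxt, if_neg c1, if_neg c2, if_neg c3]
    exact ⟨trivial, hp, fun j hj => by have := hr j hj; omega,
      fun hmem => absurd hmem hk1notI⟩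

theorem week4_loop_inv (m : Nat) : ∀ (k : Int) (t : List String) (I : List Int),
    0 ≤ k → (t.length : Int) - 1 - k ≤ (m : Int) →
    I.Pairwise (· < ·) →
    (∀ j ∈ I, 0 ≤ j ∧ j ≤ k ∧ j < (t.length : Int)) →
    ((k ∈ I) → PySem.Str.lower (PySem.List.pyGetD t k "") = "h") →
    (PySem.List.enumerate
        (((PySem.List.pyRange k ((t.length : Int) - 1) 1).foldl week4Step (t, I)).2) 0).foldl
      week4Del (((PySem.List.pyRange k ((t.length : Int) - 1) 1).foldl week4Step (t, I)).1)
    = remIdxs I 0 (t.take k.toNat) ++ week4AltGo none (decide (k ∈ I)) (t.drop k.toNat) := by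
  induction m with
  | zero =>
    intro k t I h0 hm hp hr h3
    have hk : (t.length : Int) - 1 ≤ k := by omega
    rw [PySem.List.pyRange_one_eq_nil hk]
    simp only [List.foldl_nil]
    rw [delFold_eq_remIdxs I 0 t hp (fun j hj => ⟨(hr j hj).1, by have := hr j hj; omega⟩)]
    exact week4_base k t I h0 hk
  | succ m ih =>
    intro k t I h0 hm hp hr h3
    by_cases hk : k < (t.length : Int) - 1
    · rw [PySem.List.pyRange_one_cons hk, List.foldl_cons]
      obtain ⟨hlen1, hp1, hr1, h31⟩ := week4Step_inv k t I h0 hk hp hr h3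
      have H := ih (k + 1) (week4Step (t, I) k).1 (week4Step (t, I) k).2
        (by omega) (by rw [hlen1]; omega) hp1 (by rw [hlen1]; exact hr1) h31
      rw [hlen1] at H
      rw [H]
      exact week4_step_eq k t I h0 hk hr h3
    · have hk' : (t.length : Int) - 1 ≤ k := by omega
      rw [PySem.List.pyRange_one_eq_nil hk']
      simp only [List.foldl_nil]
      rw [delFold_eq_remIdxs I 0 t hp (fun j hj => ⟨(hr j hj).1, by have := hr j hj; omega⟩)]
      exact week4_base k t I h0 hk'

-- ===== VERDICT (by name: the statement is the Claim_ definition above) =====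
theorem week4_spec : Claim_equal_week4 := by
  unfold Claim_equal_week4
  intro text _
  unfold Spec_week4
  have H := week4_loop_inv text.length 0 text [] (le_refl 0) (by omega)
    List.Pairwise.nil (by simp) (by simp)
  show (PySem.List.enumerate
      (((PySem.List.pyRange 0 ((text.length : Int) - 1) 1).foldl week4Step (text, [])).2) 0).foldl
      week4Del (((PySem.List.pyRange 0 ((text.length : Int) - 1) 1).foldl week4Step (text, [])).1)
    = week4AltGo none false text
  rw [H]
  simp [remIdxs]
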